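-- pv_equiv track=rewrite | github.com/Honey618/POSTECH | O2O/parser/parser.py | datecut
-- ===== SOURCE A (Python) =====
-- def datecut(s):
--     tmp1=""
--     tmp2=""
--     for i in range(len(s)):
--         if(str(s[i])>='0' and str(s[i])<='9'):
--             tmp1=s[i:]
--             break;
--     for i in range(len(tmp1)):
--         I = len(tmp1)-1-i
--         if(str(tmp1[I])>='0' and str(tmp1[I])<='9'):
--             tmp2=tmp1[:I+1]
--
--             if(tmp1[I+1:I+3].lower()=='am' or tmp1[I+1:I+3].lower()=='pm'):
--             	tmp2=tmp1[:I+3]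
--             break;
--     return tmp2
-- ===== SOURCE B (Python) =====
-- def datecut(s):
--     # Single left-to-right pass with accumulators: `out` holds everything from the
--     # first digit through the most recent digit, `pending` holds the characters
--     # seen since that digit; at the end pending[:2] is checked for an am/pm suffix.
--     out = []
--     pending = []
--     started = False
--     for c in s:
--         if '0' <= c <= '9':
--             started = True
--             out += pending
--             out.append(c)
--             pending = []
--         elif started:
--             pending.append(c)
--     if started and ''.join(pending[:2]).lower() in ('am', 'pm'):
--         out += pending[:2]
--     return ''.join(out)
-- ===== Notes on version B (the rewrite author's own statement) =====
-- stated objective: alternative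
-- what changed: B makes one left-to-right pass with accumulators (output-so-far up to the last digit seen, pending tail, started flag) and never slices or indexes, replacing A's two staged directional index scans over intermediate slice strings.
import Mathlib
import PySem

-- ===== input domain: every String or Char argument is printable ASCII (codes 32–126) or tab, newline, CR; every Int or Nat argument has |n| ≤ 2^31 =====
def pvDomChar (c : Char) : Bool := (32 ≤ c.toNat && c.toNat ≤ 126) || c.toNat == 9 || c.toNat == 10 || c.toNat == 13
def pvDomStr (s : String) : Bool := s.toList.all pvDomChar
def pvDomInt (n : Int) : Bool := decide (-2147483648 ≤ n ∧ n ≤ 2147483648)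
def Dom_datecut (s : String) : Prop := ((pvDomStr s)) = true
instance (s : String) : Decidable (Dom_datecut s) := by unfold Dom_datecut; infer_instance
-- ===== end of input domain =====

-- B is a single left-to-right pass with accumulators (no slicing, no index arithmetic)
-- instead of A's two staged directional index scans over slice strings: alternative.

-- '0' <= c <= '9' (Python compares the one-char strings by code point, = Char order here)
def pvIsDig (c : Char) : Bool := decide ('0' ≤ c) && decide (c ≤ '9')

-- ===== PORT A =====
-- first loop: scan left-to-right, on the first digit set tmp1 = s[i:] and break (the suffix at i)
def datecutScan1 : List Char → List Char
  | [] => []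
  | c :: t => if pvIsDig c then c :: t else datecutScan1 t

-- second loop: i = 0,1,…; I = len-1-i; on the first digit from the right build tmp2 and break.
-- t1.getD I ' ' is Python's tmp1[I], exact because I < t1.length in this branch.
def datecutScan2 (t1 : List Char) (i : Nat) : List Char :=
  if h : i < t1.length then
    let I := t1.length - 1 - i
    if pvIsDig (t1.getD I ' ') then
      -- tmp2 = tmp1[:I+1], overwritten by tmp1[:I+3] when tmp1[I+1:I+3].lower() is 'am'/'pm'
      if PySem.Chars.lower (PySem.List.slice t1 (some ((I+1 : Nat) : Int)) (some ((I+3 : Nat) : Int))) == ['a','m'] ||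
         PySem.Chars.lower (PySem.List.slice t1 (some ((I+1 : Nat) : Int)) (some ((I+3 : Nat) : Int))) == ['p','m'] then
        PySem.List.slice t1 none (some ((I+3 : Nat) : Int))
      else
        PySem.List.slice t1 none (some ((I+1 : Nat) : Int))
    else datecutScan2 t1 (i+1)
  else []
termination_by t1.length - i

def datecut (s : String) : String :=
  String.ofList (datecutScan2 (datecutScan1 s.toList) 0)

-- ===== PORT B =====
-- loop body: state (out, pending, started)
def bStep (st : List Char × List Char × Bool) (c : Char) : List Char × List Char × Bool :=
  if pvIsDig c then (st.1 ++ st.2.1 ++ [c], [], true)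
  else if st.2.2 then (st.1, st.2.1 ++ [c], true)
  else st

def datecut_alt (s : String) : String :=
  let st := s.toList.foldl bStep ([], [], false)
  -- if started and ''.join(pending[:2]).lower() in ('am', 'pm'): out += pending[:2]
  if st.2.2 && (PySem.Chars.lower (st.2.1.take 2) == ['a','m'] ||
                PySem.Chars.lower (st.2.1.take 2) == ['p','m']) then
    String.ofList (st.1 ++ st.2.1.take 2)
  else
    String.ofList st.1

-- ===== PRECONDITION & SPEC =====
def Spec_datecut (s : String) (out : String) : Prop := out = datecut_alt s
instance (s : String) (out : String) : Decidable (Spec_datecut s out) := by unfold Spec_datecut; infer_instance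

-- ===== CLAIM (what is proved, stated in full; the proofs are below) =====
def Claim_equal_datecut : Prop := ∀ (s : String), Dom_datecut s → Spec_datecut s (datecut s)

-- ===== LEMMAS AND PROOFS =====

-- the digit-position list of t with indices starting at n
def dsFn (t : List Char) (n : Nat) : List Nat :=
  ((t.zipIdx n).filter (fun p => pvIsDig p.1)).map (·.2)

theorem dsFn_nil (n : Nat) : dsFn [] n = [] := rfl

theorem dsFn_cons (c : Char) (t : List Char) (n : Nat) :
    dsFn (c :: t) n = (if pvIsDig c then [n] else []) ++ dsFn t (n+1) := by
  simp only [dsFn, List.zipIdx_cons, List.filter_cons]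
  split <;> simp

theorem dsFn_append (xs ys : List Char) (n : Nat) :
    dsFn (xs ++ ys) n = dsFn xs n ++ dsFn ys (n + xs.length) := by
  simp [dsFn, List.zipIdx_append]

theorem dsFn_shift (t : List Char) : ∀ n, dsFn t n = (dsFn t 0).map (· + n) := by
  induction t with
  | nil => intro n; simp [dsFn_nil]
  | cons c t ih =>
    intro n
    rw [dsFn_cons, dsFn_cons, ih (n+1), ih 1, List.map_append, List.map_map]
    congr 1
    · split <;> simp
    · exact List.map_congr_left (fun k _ => by simp only [Function.comp_apply]; omega)

theorem dsFn_bounds (t : List Char) : ∀ n, ∀ k ∈ dsFn t n, n ≤ k ∧ k < n + t.length := by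
  induction t with
  | nil => intro n k hk; rw [dsFn_nil] at hk; cases hk
  | cons c t ih =>
    intro n k hk
    rw [dsFn_cons] at hk
    rcases List.mem_append.mp hk with h | h
    · have : k = n := by by_cases hc : pvIsDig c <;> simp [hc] at h; omega
      simp [this]
    · have := ih (n+1) k h; simp; omega

theorem dsFn_pairwise (t : List Char) : ∀ n, (dsFn t n).Pairwise (· < ·) := by
  induction t with
  | nil => intro n; rw [dsFn_nil]; exact List.Pairwise.nil
  | cons c t ih =>
    intro n
    rw [dsFn_cons]
    refine List.pairwise_append.mpr ⟨?_, ih (n+1), ?_⟩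
    · split <;> simp
    · intro a ha b hb
      have hb' := (dsFn_bounds t (n+1) b hb).1
      have : a = n := by by_cases hc : pvIsDig c <;> simp [hc] at ha; omega
      omega

-- the output A builds once the last digit of t1 sits at index I
def outAt (t1 : List Char) (I : Nat) : List Char :=
  if PySem.Chars.lower ((t1.drop (I+1)).take 2) == ['a','m'] ||
     PySem.Chars.lower ((t1.drop (I+1)).take 2) == ['p','m'] then
    t1.take (I+3)
  else
    t1.take (I+1)

-- outAt rephrased with the slice expressions A's second scan builds
theorem outAt_eq (t1 : List Char) (I : Nat) :
    outAt t1 I =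
      if PySem.Chars.lower (PySem.List.slice t1 (some ((I+1 : Nat) : Int)) (some ((I+3 : Nat) : Int))) == ['a','m'] ||
         PySem.Chars.lower (PySem.List.slice t1 (some ((I+1 : Nat) : Int)) (some ((I+3 : Nat) : Int))) == ['p','m'] then
        PySem.List.slice t1 none (some ((I+3 : Nat) : Int))
      else
        PySem.List.slice t1 none (some ((I+1 : Nat) : Int)) := by
  have hsl : PySem.List.slice t1 (some ((I+1 : Nat) : Int)) (some ((I+3 : Nat) : Int)) =
      (t1.drop (I+1)).take 2 := by
    rw [PySem.List.slice_natCast]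
    congr 1
    omega
  rw [hsl, PySem.List.slice_to_natCast, PySem.List.slice_to_natCast]
  rfl

-- what datecutScan1 returns, phrased through the digit-position list
theorem scan1_char (t : List Char) :
    (dsFn t 0 = [] ∧ datecutScan1 t = []) ∨
    (∃ i rest, dsFn t 0 = i :: rest ∧ datecutScan1 t = t.drop i ∧
       dsFn (t.drop i) 0 = (i :: rest).map (· - i) ∧ ∀ k ∈ rest, i ≤ k) := by
  induction t with
  | nil => exact Or.inl ⟨rfl, rfl⟩
  | cons c t ih =>
    by_cases hc : pvIsDig c
    · refine Or.inr ⟨0, (dsFn t 1), ?_, ?_, ?_, ?_⟩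
      · rw [dsFn_cons]; simp [hc]
      · simp [datecutScan1, hc]
      · rw [List.drop_zero, dsFn_cons]; simp [hc]
      · intro k _; omega
    · have hstep : dsFn (c :: t) 0 = (dsFn t 0).map (· + 1) := by
        rw [dsFn_cons, dsFn_shift t 1]; simp [hc]
      have hsc : datecutScan1 (c :: t) = datecutScan1 t := by simp [datecutScan1, hc]
      rcases ih with ⟨h1, h2⟩ | ⟨i, rest, h1, h2, h3, h4⟩
      · exact Or.inl ⟨by rw [hstep, h1]; rfl, by rw [hsc, h2]⟩
      · refine Or.inr ⟨i + 1, rest.map (· + 1), ?_, ?_, ?_, ?_⟩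
        · rw [hstep, h1]; rfl
        · rw [hsc, h2]; rfl
        · show dsFn (t.drop i) 0 = _
          rw [h3]
          simp only [List.map_cons, List.map_map]
          congr 1
          · omega
          · exact List.map_congr_left (fun k _ => by simp only [Function.comp_apply]; omega)
        · intro k hk
          obtain ⟨m, hm, rfl⟩ := List.mem_map.mp hk
          have := h4 m hm; omega

-- what datecutScan2 returns: the last digit of the not-yet-scanned prefix decides
theorem scan2_char (t1 : List Char) :
    ∀ n i, i ≤ t1.length → t1.length - i = n →
      datecutScan2 t1 i =
        match (dsFn (t1.take (t1.length - i)) 0).getLast? with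
        | none => []
        | some I => outAt t1 I := by
  intro n
  induction n with
  | zero =>
    intro i hi hn
    have hi' : i = t1.length := by omega
    rw [datecutScan2, dif_neg (by omega)]
    simp [hi', dsFn_nil]
  | succ m ih =>
    intro i hi hn
    have hlt : i < t1.length := by omega
    have hI : t1.length - 1 - i < t1.length := by omega
    obtain ⟨c, hc⟩ : ∃ c, t1[t1.length - 1 - i]? = some c :=
      ⟨t1[t1.length - 1 - i]'hI, List.getElem?_eq_getElem hI⟩
    have htake : t1.take (t1.length - i) =
        t1.take (t1.length - 1 - i) ++ [c] := by
      have : t1.length - i = (t1.length - 1 - i) + 1 := by omega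
      rw [this, List.take_add_one, hc]; rfl
    have hlen : (t1.take (t1.length - 1 - i)).length = t1.length - 1 - i := by
      simp; omega
    have hds : dsFn (t1.take (t1.length - i)) 0 =
        dsFn (t1.take (t1.length - 1 - i)) 0 ++
          (if pvIsDig c then [t1.length - 1 - i] else []) := by
      rw [htake, dsFn_append, hlen, dsFn_cons, dsFn_nil]
      simp
    have hget : t1.getD (t1.length - 1 - i) ' ' = c := by
      simp [List.getD, hc]
    rw [datecutScan2, dif_pos hlt]
    simp only [hget]
    by_cases hdig : pvIsDig c
    · rw [if_pos hdig]
      have : (dsFn (t1.take (t1.length - i)) 0).getLast? = some (t1.length - 1 - i) := by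
        rw [hds, if_pos hdig, List.getLast?_concat]
      rw [this]
      show _ = outAt t1 (t1.length - 1 - i)
      rw [outAt_eq]
    · rw [if_neg hdig]
      have hnext : t1.length - (i+1) = t1.length - 1 - i := by omega
      have heq : dsFn (t1.take (t1.length - i)) 0 = dsFn (t1.take (t1.length - (i+1))) 0 := by
        rw [hds, if_neg hdig, List.append_nil, hnext]
      rw [heq]
      exact ih (i+1) (by omega) (by omega)

theorem scanRes_nil (t : List Char) (h : dsFn t 0 = []) :
    datecutScan2 (datecutScan1 t) 0 = [] := by
  rcases scan1_char t with ⟨_, h2⟩ | ⟨i, rest, h1, _, _, _⟩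
  · rw [h2, datecutScan2]
    simp
  · rw [h1] at h
    exact absurd h (List.cons_ne_nil i rest)

theorem scanRes_cons (t : List Char) (i : Nat) (rest : List Nat) (j : Nat)
    (h : dsFn t 0 = i :: rest) (hj : (i :: rest).getLast (List.cons_ne_nil i rest) = j) :
    datecutScan2 (datecutScan1 t) 0 =
      PySem.List.slice t (some ((i : Nat) : Int))
        (some (((if PySem.Chars.lower (PySem.List.slice t (some ((j+1 : Nat) : Int)) (some ((j+3 : Nat) : Int))) == ['a','m'] ||
                    PySem.Chars.lower (PySem.List.slice t (some ((j+1 : Nat) : Int)) (some ((j+3 : Nat) : Int))) == ['p','m'] then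
                  j + 3 else j + 1) : Nat) : Int)) := by
  rcases scan1_char t with ⟨h1, _⟩ | ⟨i0, rest0, h1, h2, h3, h4⟩
  · rw [h1] at h
    exact absurd h.symm (List.cons_ne_nil i rest)
  rw [h1] at h
  injection h with hi hr
  rw [hi] at h2 h3 h4
  rw [hr] at h3 h4
  have hij : i ≤ j := by
    have hmem : j ∈ i :: rest := hj ▸ List.getLast_mem (List.cons_ne_nil i rest)
    rcases List.mem_cons.mp hmem with hh | hh
    · omega
    · exact h4 j hh
  have hlast : (dsFn (t.drop i) 0).getLast? = some (j - i) := by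
    rw [h3, List.getLast?_map, List.getLast?_eq_some_getLast (List.cons_ne_nil i rest), hj]
    rfl
  rw [h2, scan2_char (t.drop i) ((t.drop i).length) 0 (by omega) (by omega),
    Nat.sub_zero, List.take_length, hlast]
  have hdd : (t.drop i).drop (j - i + 1) = t.drop (j + 1) := by
    rw [List.drop_drop]
    congr 1
    omega
  have hsuf : PySem.List.slice t (some ((j+1 : Nat) : Int)) (some ((j+3 : Nat) : Int)) =
      ((t.drop i).drop (j - i + 1)).take 2 := by
    rw [hdd, PySem.List.slice_natCast]
    congr 1
    omega
  show outAt (t.drop i) (j - i) = _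
  simp only [outAt, ← hsuf]
  by_cases hcond : (PySem.Chars.lower (PySem.List.slice t (some ((j+1 : Nat) : Int)) (some ((j+3 : Nat) : Int))) == ['a','m'] ||
      PySem.Chars.lower (PySem.List.slice t (some ((j+1 : Nat) : Int)) (some ((j+3 : Nat) : Int))) == ['p','m']) = true
  · rw [if_pos hcond, if_pos hcond, PySem.List.slice_natCast]
    congr 1
    omega
  · rw [if_neg hcond, if_neg hcond, PySem.List.slice_natCast]
    congr 1
    omega

-- characterization of B's fold: first digit i, last digit j decide the state
def bChr (t : List Char) : List Char × List Char × Bool :=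
  match (dsFn t 0).head?, (dsFn t 0).getLast? with
  | some i, some j => ((t.take (j+1)).drop i, t.drop (j+1), true)
  | _, _ => ([], [], false)

theorem bChr_nil (t : List Char) (h : dsFn t 0 = []) : bChr t = ([], [], false) := by
  simp [bChr, h]

theorem bChr_some (t : List Char) (i j : Nat)
    (hh : (dsFn t 0).head? = some i) (hl : (dsFn t 0).getLast? = some j) :
    bChr t = ((t.take (j+1)).drop i, t.drop (j+1), true) := by
  unfold bChr
  rw [hh, hl]

-- head ≤ last in the digit-position list
theorem dsFn_head_le_getLast (t : List Char) (i j : Nat)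
    (hh : (dsFn t 0).head? = some i) (hl : (dsFn t 0).getLast? = some j) : i ≤ j := by
  rcases h : dsFn t 0 with _ | ⟨a, rest⟩
  · rw [h] at hh; cases hh
  · rw [h] at hh hl
    injection hh with hh
    have hp := dsFn_pairwise t 0
    rw [h] at hp
    have hj : j ∈ a :: rest := List.mem_of_getLast? hl
    rcases List.mem_cons.mp hj with h1 | h1
    · omega
    · have := (List.pairwise_cons.mp hp).1 j h1
      omega

-- last digit index is in range
theorem dsFn_getLast_lt (t : List Char) (j : Nat)
    (hl : (dsFn t 0).getLast? = some j) : j < t.length := by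
  have hmem : j ∈ dsFn t 0 := List.mem_of_getLast? hl
  have := (dsFn_bounds t 0 j hmem).2
  omega

theorem fold_bChr (t : List Char) : t.foldl bStep ([], [], false) = bChr t := by
  induction t using List.reverseRecOn with
  | nil => rw [bChr_nil [] rfl]; rfl
  | append_singleton t c ih =>
    rw [List.foldl_append, List.foldl_cons, List.foldl_nil, ih]
    have hds : dsFn (t ++ [c]) 0 =
        dsFn t 0 ++ (if pvIsDig c then [t.length] else []) := by
      rw [dsFn_append, dsFn_cons, dsFn_nil]
      simp
    by_cases hc : pvIsDig c
    · rw [if_pos hc] at hds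
      have hl' : (dsFn (t ++ [c]) 0).getLast? = some t.length := by
        rw [hds, List.getLast?_concat]
      rcases h : dsFn t 0 with _ | ⟨i, rest⟩
      · -- no digit in t: c is the first and last digit
        have hh' : (dsFn (t ++ [c]) 0).head? = some t.length := by
          rw [hds, h]; rfl
        rw [bChr_nil t h, bChr_some (t ++ [c]) t.length t.length hh' hl']
        unfold bStep
        rw [if_pos hc]
        simp only [Prod.mk.injEq]
        refine ⟨?_, ?_, trivial⟩
        · rw [List.take_of_length_le (by simp),
             List.drop_append_of_le_length (le_refl _), List.drop_length]
          rfl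
        · rw [List.drop_of_length_le (by simp)]
      · have hh : (dsFn t 0).head? = some i := by rw [h]; rfl
        obtain ⟨j, hl⟩ : ∃ j, (dsFn t 0).getLast? = some j :=
          ⟨_, by rw [h]; exact List.getLast?_eq_some_getLast (List.cons_ne_nil i rest)⟩
        have hij : i ≤ j := dsFn_head_le_getLast t i j hh hl
        have hjlt : j < t.length := dsFn_getLast_lt t j hl
        have hh' : (dsFn (t ++ [c]) 0).head? = some i := by
          rw [hds, h]; rfl
        rw [bChr_some t i j hh hl, bChr_some (t ++ [c]) i t.length hh' hl']
        unfold bStep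
        rw [if_pos hc]
        simp only [Prod.mk.injEq]
        refine ⟨?_, ?_, trivial⟩
        · have hA : (t.take (j+1)).drop i ++ t.drop (j+1) = t.drop i := by
            rw [← List.drop_append_of_le_length (by simp; omega), List.take_append_drop]
          rw [hA, List.take_of_length_le (by simp),
             List.drop_append_of_le_length (by omega)]
        · rw [List.drop_of_length_le (by simp)]
    · rw [if_neg hc, List.append_nil] at hds
      rcases h : dsFn t 0 with _ | ⟨i, rest⟩
      · rw [bChr_nil t h, bChr_nil (t ++ [c]) (by rw [hds, h])]
        simp [bStep, hc]
      · have hh : (dsFn t 0).head? = some i := by rw [h]; rfl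
        obtain ⟨j, hl⟩ : ∃ j, (dsFn t 0).getLast? = some j :=
          ⟨_, by rw [h]; exact List.getLast?_eq_some_getLast (List.cons_ne_nil i rest)⟩
        have hjlt : j < t.length := dsFn_getLast_lt t j hl
        have hh' : (dsFn (t ++ [c]) 0).head? = some i := by rw [hds, hh]
        have hl' : (dsFn (t ++ [c]) 0).getLast? = some j := by rw [hds, hl]
        rw [bChr_some t i j hh hl, bChr_some (t ++ [c]) i j hh' hl']
        unfold bStep
        rw [if_neg hc, if_pos (by trivial)]
        simp only [Prod.mk.injEq]
        refine ⟨?_, ?_, trivial⟩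
        · rw [List.take_append_of_le_length (by omega)]
        · rw [List.drop_append_of_le_length (by omega)]

-- ===== VERDICT (by name: the statement is the Claim_ definition above) =====
theorem datecut_spec : Claim_equal_datecut := by
  intro s _
  show datecut s = datecut_alt s
  simp only [datecut, datecut_alt, fold_bChr]
  rcases h : dsFn s.toList 0 with _ | ⟨i, rest⟩
  · rw [scanRes_nil s.toList h, bChr_nil s.toList h]
    rfl
  · set t := s.toList with ht
    have hh : (dsFn t 0).head? = some i := by rw [h]; rfl
    obtain ⟨j, hl, hj⟩ : ∃ j, (dsFn t 0).getLast? = some j ∧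
        (i :: rest).getLast (List.cons_ne_nil i rest) = j :=
      ⟨_, by rw [h]; exact List.getLast?_eq_some_getLast (List.cons_ne_nil i rest), rfl⟩
    have hij : i ≤ j := dsFn_head_le_getLast t i j hh hl
    have hjlt : j < t.length := dsFn_getLast_lt t j hl
    rw [scanRes_cons t i rest j h hj, bChr_some t i j hh hl]
    have hsuf : PySem.List.slice t (some ((j+1 : Nat) : Int)) (some ((j+3 : Nat) : Int)) =
        (t.drop (j+1)).take 2 := by
      rw [PySem.List.slice_natCast]
      congr 1
      omega
    simp only [hsuf, Bool.true_and]
    by_cases hcond : (PySem.Chars.lower ((t.drop (j+1)).take 2) == ['a','m'] ||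
        PySem.Chars.lower ((t.drop (j+1)).take 2) == ['p','m']) = true
    · rw [if_pos hcond, if_pos hcond]
      congr 1
      rw [PySem.List.slice_natCast]
      have e1 : j + 3 - i = (j + 1 - i) + 2 := by omega
      rw [e1, List.take_add]
      congr 1
      · rw [List.drop_take]
      · rw [List.drop_drop]
        congr 2
        omega
    · rw [if_neg hcond, if_neg hcond]
      congr 1
      rw [PySem.List.slice_natCast, List.drop_take]
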